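-- pv_equiv track=rewrite | github.com/smadhu247/CS-115 | life.py | innerCells
-- ===== SOURCE A (Python) =====
-- def createOneRow(width):
--     """Returns one row of zeros of width "width"...
--        You should use this in your
--        createBoard(width, height) function."""
--     row = []
--     for col in range(width):
--         row += [0]
--     return row
--
-- def createBoard(width, height):
--     """ returns a 2d array with "height" rows and "width" cols """
--     A = []
--     for row in range(0, height):
--         A += [createOneRow(width)]    # What do you need to add a whole row here?
--     return A
--
-- def innerCells(w,h):
--     A = createBoard(w, h)
--     for row in range(h):
--         for col in range(w):
--             if row == 0 or col == 0 or row == h-1 or col == w-1: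
--                 A[row][col] = 0
--             else:
--                 A[row][col] = 1
--     return A
-- ===== SOURCE B (Python) =====
-- def innerCells(w, h):
--     if h <= 0:
--         return []
--     border = [0] * w
--     inner = [1 if 0 < c < w - 1 else 0 for c in range(w)]
--     return [list(border) if r == 0 or r == h - 1 else list(inner) for r in range(h)]
-- ===== Notes on version B (the rewrite author's own statement) =====
-- stated objective: simpler
-- what changed: B precomputes a border row and an interior row template once and assembles the board by classifying rows, instead of allocating a zero board and then rewriting every cell with a per-cell branch as A does.
import Mathlib
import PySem

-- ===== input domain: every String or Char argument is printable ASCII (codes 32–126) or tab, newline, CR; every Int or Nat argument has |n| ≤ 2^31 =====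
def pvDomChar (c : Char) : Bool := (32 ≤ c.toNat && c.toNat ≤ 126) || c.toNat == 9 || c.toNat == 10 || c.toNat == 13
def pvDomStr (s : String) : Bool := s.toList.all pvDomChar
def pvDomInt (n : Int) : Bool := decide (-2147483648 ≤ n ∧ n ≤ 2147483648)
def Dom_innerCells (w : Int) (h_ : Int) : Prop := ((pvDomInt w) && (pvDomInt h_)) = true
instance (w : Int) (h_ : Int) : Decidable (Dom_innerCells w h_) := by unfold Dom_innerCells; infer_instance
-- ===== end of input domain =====

-- B builds the board from two precomputed row templates (border row, interior row) chosen per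
-- row index, instead of zero-filling the whole board and rewriting every cell with a per-cell
-- branch as A does; objective: simpler. Equivalence is about the return value.

-- ===== PORT A =====
def createOneRow (width : Int) : List Int :=
  (PySem.List.pyRange 0 width 1).foldl (fun row _ => row ++ [0]) []

def createBoard (width height : Int) : List (List Int) :=
  (PySem.List.pyRange 0 height 1).foldl (fun A _ => A ++ [createOneRow width]) []

-- A[row][col] = v ; exact for 0 ≤ row < len(A), 0 ≤ col < len(A[row]), which the loops guarantee
def pvSetCell (A : List (List Int)) (r c : Int) (v : Int) : List (List Int) :=
  A.set r.toNat ((A.getD r.toNat []).set c.toNat v)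

def innerCells (w : Int) (h_ : Int) : List (List Int) :=
  (PySem.List.pyRange 0 h_ 1).foldl (fun A row =>
    (PySem.List.pyRange 0 w 1).foldl (fun A col =>
      pvSetCell A row col
        (if row = 0 ∨ col = 0 ∨ row = h_ - 1 ∨ col = w - 1 then 0 else 1)) A)
    (createBoard w h_)

-- ===== PORT B =====
def innerCells_alt (w : Int) (h_ : Int) : List (List Int) :=
  if h_ ≤ 0 then [] else
  let border := List.replicate w.toNat (0 : Int)
  let inner := (PySem.List.pyRange 0 w 1).map (fun c => if 0 < c ∧ c < w - 1 then (1 : Int) else 0)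
  (PySem.List.pyRange 0 h_ 1).map (fun r => if r = 0 ∨ r = h_ - 1 then border else inner)

-- ===== PRECONDITION & SPEC =====
def Spec_innerCells (w : Int) (h_ : Int) (out : List (List Int)) : Prop := out = innerCells_alt w h_
instance (w : Int) (h_ : Int) (out : List (List Int)) : Decidable (Spec_innerCells w h_ out) := by unfold Spec_innerCells; infer_instance

-- ===== CLAIM (what is proved, stated in full; the proofs are below) =====
def Claim_equal_innerCells : Prop := ∀ (w : Int) (h_ : Int), Dom_innerCells w h_ → Spec_innerCells w h_ (innerCells w h_)

-- ===== LEMMAS AND PROOFS =====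

-- appending a constant element n times yields init ++ replicate
theorem pv_foldl_append {α β : Type} (v : α) (l : List β) (init : List α) :
    l.foldl (fun r _ => r ++ [v]) init = init ++ List.replicate l.length v := by
  induction l generalizing init with
  | nil => simp
  | cons x xs ih => simp [List.foldl_cons, ih, List.replicate_succ]

theorem pv_createOneRow (w : Int) : createOneRow w = List.replicate w.toNat 0 := by
  rw [createOneRow, PySem.List.pyRange_one, pv_foldl_append]
  simp

theorem pv_createBoard (w h : Int) :
    createBoard w h = List.replicate h.toNat (List.replicate w.toNat 0) := by
  rw [createBoard, PySem.List.pyRange_one, pv_foldl_append]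
  simp [pv_createOneRow]

-- repeated sets at the same outer index collapse to one set of an inner fold
theorem pv_foldl_set_same {α β : Type} (d : α) (r : Nat) (F : α → β → α)
    (l : List β) (A : List α) (hr : r < A.length) :
    l.foldl (fun B c => B.set r (F (B.getD r d) c)) A = A.set r (l.foldl F (A.getD r d)) := by
  induction l generalizing A with
  | nil =>
      rw [List.foldl_nil, List.foldl_nil, List.getD_eq_getElem A d hr, List.set_getElem_self hr]
  | cons x xs ih =>
      have h1 : r < (A.set r (F (A.getD r d) x)).length := by simpa using hr
      rw [List.foldl_cons, ih _ h1, List.set_set, List.getD_eq_getElem _ _ h1,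
        List.getElem_set_self, List.foldl_cons]

-- writing cell i ← f i for i = 0..n-1 rewrites the prefix of length n
theorem pv_foldl_set_range {α : Type} (f : Nat → α) :
    ∀ (n : Nat) (l : List α), n ≤ l.length →
    (List.range n).foldl (fun acc i => acc.set i (f i)) l
      = (List.range n).map f ++ l.drop n := by
  intro n
  induction n with
  | zero => simp
  | succ m ih =>
      intro l hl
      have hm' : m < l.length := by omega
      rw [List.range_succ, List.foldl_append, ih l (by omega), List.foldl_cons, List.foldl_nil]
      rw [List.set_append_right _ _ (by simp)]
      simp only [List.length_map, List.length_range, Nat.sub_self]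
      rw [List.drop_eq_getElem_cons hm', List.set_cons_zero]
      simp

-- the whole double loop of A, as one closed form
theorem pv_outer (w : Int) (v : Int → Int → Int) :
    ∀ (n : Nat) (A : List (List Int)),
      (∀ row ∈ A, row.length = w.toNat) → n ≤ A.length →
    (List.range n).foldl (fun B k =>
        (List.range w.toNat).foldl (fun B' c =>
          B'.set k ((B'.getD k []).set c (v (k : Int) (c : Int)))) B) A
      = (List.range n).map (fun (k : Nat) => (List.range w.toNat).map (fun (c : Nat) => v (k : Int) (c : Int)))
          ++ A.drop n := by
  intro n
  induction n with
  | zero => simp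
  | succ m ih =>
      intro A hrow hl
      have hm' : m < A.length := by omega
      rw [List.range_succ, List.foldl_append, ih A hrow (by omega), List.foldl_cons,
        List.foldl_nil]
      set P := (List.range m).map
        (fun (k : Nat) => (List.range w.toNat).map (fun (c : Nat) => v (k : Int) (c : Int))) with hP
      have hPlen : P.length = m := by simp [hP]
      have hml : m < (P ++ A.drop m).length := by
        simp [hPlen]; omega
      rw [pv_foldl_set_same [] m (fun row c => row.set c (v (m : Int) (c : Int))) (List.range w.toNat) _ hml]
      have hget : (P ++ A.drop m).getD m [] = A[m] := by
        rw [List.getD_eq_getElem _ _ hml, List.getElem_append_right (by omega)]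
        simp [hPlen]
      rw [hget]
      have hAm : A[m].length = w.toNat := hrow _ (List.getElem_mem hm')
      rw [pv_foldl_set_range (fun (c : Nat) => v (m : Int) (c : Int)) _ _ (by omega)]
      have hdrop : List.drop w.toNat A[m] = [] := by
        rw [← hAm]; exact List.drop_length
      rw [hdrop, List.append_nil]
      have hset : (P ++ A.drop m).set m ((List.range w.toNat).map
            (fun (c : Nat) => v (m : Int) (c : Int)))
          = P ++ ((A.drop m).set 0 ((List.range w.toNat).map (fun (c : Nat) => v (m : Int) (c : Int)))) := by
        rw [List.set_append_right _ _ (by omega), hPlen, Nat.sub_self]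
      rw [hset, List.drop_eq_getElem_cons hm', List.set_cons_zero]
      simp [hP]

-- A's result in closed form
theorem pv_A_closed (w h_ : Int) :
    innerCells w h_
      = (List.range h_.toNat).map (fun (k : Nat) =>
          (List.range w.toNat).map (fun (c : Nat) =>
            if (k : Int) = 0 ∨ (c : Int) = 0 ∨ (k : Int) = h_ - 1 ∨ (c : Int) = w - 1
            then (0 : Int) else 1)) := by
  rw [innerCells, pv_createBoard]
  simp only [pvSetCell, PySem.List.pyRange_one, List.foldl_map, zero_add, Int.toNat_natCast,
    Int.sub_zero]
  have h := pv_outer w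
    (fun r c => if r = 0 ∨ c = 0 ∨ r = h_ - 1 ∨ c = w - 1 then (0 : Int) else 1)
    h_.toNat (List.replicate h_.toNat (List.replicate w.toNat 0))
    (by intro row hr; simp [List.eq_of_mem_replicate hr])
    (by simp)
  simp only [] at h
  rw [h]
  simp

-- B's result in closed form
theorem pv_B_closed (w h_ : Int) :
    innerCells_alt w h_
      = (List.range h_.toNat).map (fun (k : Nat) =>
          if (k : Int) = 0 ∨ (k : Int) = h_ - 1
          then List.replicate w.toNat (0 : Int)
          else (List.range w.toNat).map (fun (c : Nat) =>
            if 0 < (c : Int) ∧ (c : Int) < w - 1 then (1 : Int) else 0)) := by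
  rw [innerCells_alt]
  by_cases h0 : h_ ≤ 0
  · rw [if_pos h0]
    have : h_.toNat = 0 := by omega
    simp [this]
  · rw [if_neg h0]
    simp only [PySem.List.pyRange_one, List.map_map, Int.sub_zero, zero_add, Function.comp_def]

-- ===== VERDICT (by name: the statement is the Claim_ definition above) =====
theorem innerCells_spec : Claim_equal_innerCells := by
  intro w h_ _
  show innerCells w h_ = innerCells_alt w h_
  rw [pv_A_closed, pv_B_closed]
  apply List.map_congr_left
  intro k hk
  by_cases hkb : (k : Int) = 0 ∨ (k : Int) = h_ - 1
  · rw [if_pos hkb]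
    have hcell : ∀ c ∈ List.range w.toNat,
        (if (k : Int) = 0 ∨ (c : Int) = 0 ∨ (k : Int) = h_ - 1 ∨ (c : Int) = w - 1
         then (0 : Int) else 1) = (fun _ : Nat => (0 : Int)) c := by
      intro c _; rcases hkb with h | h <;> simp [h]
    rw [List.map_congr_left hcell, List.map_const', List.length_range]
  · rw [if_neg hkb]
    push Not at hkb
    obtain ⟨hk1, hk2⟩ := hkb
    apply List.map_congr_left
    intro c hc
    have hcw : c < w.toNat := List.mem_range.mp hc
    by_cases hc0 : (c : Int) = 0 ∨ (c : Int) = w - 1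
    · rw [if_pos (by tauto), if_neg (by rcases hc0 with h | h <;> omega)]
    · push Not at hc0
      rw [if_neg (by tauto), if_pos (by omega)]
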